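-- pv_equiv track=rewrite | github.com/Edilawit-Manaye/competitive-programming | 19-Jun-2025/Find the Substring With Maximum Cost 368355.py | maximumCostSubstring
-- ===== SOURCE A (Python) =====
-- from typing import List
--
-- def maximumCostSubstring(s: str, chars: str, vals: List[int]) -> int:
--     best = 0
--     lookup = {}
--
--     for i in range(26):
--         lookup[chr(i + ord('a'))] = i + 1
--
--     for c, v in zip(chars, vals):
--         lookup[c] = v
--
--     current = 0
--
--     for c in s:
--         current += lookup.get(c, 0)
--         if current < 0:
--             current = 0
--         best = max(best, current)
--
--     return best
-- ===== SOURCE B (Python) =====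
-- def maximumCostSubstring(s: str, chars: str, vals: list) -> int:
--     # value table indexed by ASCII code instead of a dict
--     table = [0] * 128
--     for k in range(ord('a'), ord('z') + 1):
--         table[k] = k - ord('a') + 1
--     for ch, v in zip(chars, vals):
--         if ord(ch) < 128:
--             table[ord(ch)] = v
--     # prefix-sum / minimum-prefix scan instead of reset-Kadane
--     prefix = 0
--     low = 0
--     best = 0
--     for c in s:
--         prefix += table[ord(c)] if ord(c) < 128 else 0
--         if prefix - low > best:
--             best = prefix - low
--         if prefix < low:
--             low = prefix
--     return best
-- ===== Notes on version B (the rewrite author's own statement) =====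
-- stated objective: alternative
-- what changed: Replaces A's hash-dict lookup by a 128-entry ASCII value table and A's reset-to-zero Kadane loop by a prefix-sum scan that tracks the running minimum prefix, taking best = max(best, prefix - min_prefix) each step.
import Mathlib
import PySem

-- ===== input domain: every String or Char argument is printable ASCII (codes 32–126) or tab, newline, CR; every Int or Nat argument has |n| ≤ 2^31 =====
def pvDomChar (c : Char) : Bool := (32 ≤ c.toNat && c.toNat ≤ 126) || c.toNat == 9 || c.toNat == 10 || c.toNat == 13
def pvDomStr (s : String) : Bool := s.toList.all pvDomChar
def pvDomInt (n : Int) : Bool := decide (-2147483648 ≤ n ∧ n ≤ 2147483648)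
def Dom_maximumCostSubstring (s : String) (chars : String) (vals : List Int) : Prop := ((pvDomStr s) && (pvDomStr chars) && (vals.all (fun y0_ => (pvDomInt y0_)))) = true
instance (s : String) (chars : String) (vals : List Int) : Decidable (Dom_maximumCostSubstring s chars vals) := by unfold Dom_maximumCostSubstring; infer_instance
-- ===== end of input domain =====

-- B replaces A's dict lookup by a 128-entry ASCII value table and A's reset-to-zero Kadane scan by a prefix-sum / minimum-prefix scan (same cost, different algorithm and data structure).


-- ===== PORT A =====
def maximumCostSubstring (s : String) (chars : String) (vals : List Int) : Int :=
  -- best = 0; lookup = {}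
  -- for i in range(26): lookup[chr(i + ord('a'))] = i + 1
  let lookup : PySem.Dict Char Int :=
    (PySem.List.pyRange 0 26 1).foldl
      (fun d i => d.insert (Char.ofNat (i.toNat + 97)) (i + 1)) PySem.Dict.empty
  -- for c, v in zip(chars, vals): lookup[c] = v
  let lookup := (List.zip chars.toList vals).foldl (fun d cv => d.insert cv.1 cv.2) lookup
  -- current = 0; for c in s: current += lookup.get(c, 0); if current < 0: current = 0; best = max(best, current)
  let st := s.toList.foldl
    (fun (st : Int × Int) c =>
      let current := st.1 + lookup.getD c 0
      let current := if current < 0 then 0 else current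
      (current, max st.2 current)) (0, 0)
  st.2

-- ===== PORT B =====
def maximumCostSubstring_alt (s : String) (chars : String) (vals : List Int) : Int :=
  -- table = [0] * 128
  -- for k in range(ord('a'), ord('z') + 1): table[k] = k - ord('a') + 1
  let table : List Int := List.replicate 128 0
  let table := (PySem.List.pyRange 97 123 1).foldl
    (fun t k => PySem.List.pySetD t k (k - 96)) table
  -- for ch, v in zip(chars, vals):
  --   if ord(ch) < 128: table[ord(ch)] = v
  let table := (List.zip chars.toList vals).foldl
    (fun t p => if p.1.toNat < 128 then PySem.List.pySetD t (p.1.toNat : Int) p.2 else t) table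
  -- prefix = 0; low = 0; best = 0
  -- for c in s:
  --   prefix += table[ord(c)] if ord(c) < 128 else 0   (ord(c) < 128 keeps the index in range)
  --   if prefix - low > best: best = prefix - low
  --   if prefix < low: low = prefix
  let st := s.toList.foldl
    (fun (st : Int × Int × Int) c =>
      let pfx := st.1 + (if c.toNat < 128 then PySem.List.pyGetD table (c.toNat : Int) 0 else 0)
      (pfx,
       if pfx < st.2.1 then pfx else st.2.1,
       if pfx - st.2.1 > st.2.2 then pfx - st.2.1 else st.2.2)) (0, 0, 0)
  st.2.2

-- ===== PRECONDITION & SPEC =====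
def Spec_maximumCostSubstring (s : String) (chars : String) (vals : List Int) (out : Int) : Prop := out = maximumCostSubstring_alt s chars vals
instance (s : String) (chars : String) (vals : List Int) (out : Int) : Decidable (Spec_maximumCostSubstring s chars vals out) := by unfold Spec_maximumCostSubstring; infer_instance

-- ===== CLAIM (what is proved, stated in full; the proofs are below) =====
def Claim_equal_maximumCostSubstring : Prop := ∀ (s : String) (chars : String) (vals : List Int), Dom_maximumCostSubstring s chars vals → Spec_maximumCostSubstring s chars vals (maximumCostSubstring s chars vals)

-- ===== LEMMAS AND PROOFS =====

-- getD after List.set, index in range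
theorem getD_set_eq_ite (l : List Int) (i j : Nat) (v : Int) (hi : i < l.length) :
    (l.set i v).getD j 0 = if j = i then v else l.getD j 0 := by
  by_cases h : j = i
  · subst h; simp [List.getD_eq_getElem?_getD, hi]
  · simp [List.getD_eq_getElem?_getD, List.getElem?_set_ne (fun e => h e.symm), h]

-- The base table (after the 26 lowercase inserts) agrees with A's base dict on every ASCII code.
set_option maxRecDepth 8192 in
theorem base_agree : ∀ k : Nat, k < 128 →
    ((PySem.List.pyRange 0 26 1).foldl
      (fun d i => d.insert (Char.ofNat (i.toNat + 97)) (i + 1)) PySem.Dict.empty).getD (Char.ofNat k) 0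
    = PySem.List.pyGetD
        ((PySem.List.pyRange 97 123 1).foldl
          (fun t k => PySem.List.pySetD t k (k - 96)) (List.replicate 128 0)) (k : Int) 0 := by
  decide

set_option maxRecDepth 8192 in
theorem base_len :
    ((PySem.List.pyRange 97 123 1).foldl
      (fun t k => PySem.List.pySetD t k (k - 96)) (List.replicate 128 0)).length = 128 := by
  decide

-- Pushing the zip pairs through dict-insert and table-set preserves pointwise agreement on ASCII.
theorem pairs_agree (pairs : List (Char × Int)) :
    ∀ (d : PySem.Dict Char Int) (t : List Int), t.length = 128 →
    (∀ p ∈ pairs, p.1.toNat < 128) →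
    (∀ c : Char, c.toNat < 128 → d.getD c 0 = t.getD c.toNat 0) →
    ∀ c : Char, c.toNat < 128 →
      (pairs.foldl (fun d cv => d.insert cv.1 cv.2) d).getD c 0
      = (pairs.foldl (fun t p => if p.1.toNat < 128 then PySem.List.pySetD t (p.1.toNat : Int) p.2 else t) t).getD c.toNat 0 := by
  induction pairs with
  | nil => intro d t _ _ hpt c hc; exact hpt c hc
  | cons p rest ih =>
    intro d t hlen hdom hpt c hc
    have hp : p.1.toNat < 128 := hdom p (by simp)
    have hstep : ∀ c : Char, c.toNat < 128 →
        (d.insert p.1 p.2).getD c 0 = (t.set p.1.toNat p.2).getD c.toNat 0 := by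
      intro c hc
      rw [PySem.Dict.getD_insert, getD_set_eq_ite t p.1.toNat c.toNat p.2 (by omega)]
      by_cases h : c = p.1
      · simp [h]
      · have hne : ¬ c.toNat = p.1.toNat := fun e => h (by
          have := congrArg Char.ofNat e
          rwa [Char.ofNat_toNat, Char.ofNat_toNat] at this)
        simp only [if_neg h, if_neg hne]
        exact hpt c hc
    have := ih (d.insert p.1 p.2) (t.set p.1.toNat p.2)
      (by rw [List.length_set]; exact hlen) (fun q hq => hdom q (by simp [hq])) hstep c hc
    simpa [List.foldl_cons, hp, PySem.List.pySetD_natCast] using this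

-- Loop invariant: A's reset-Kadane state equals B's prefix/min-prefix state.
theorem kadane_eq_prefixmin (g : Char → Int) :
    ∀ (l : List Char) (pfx minp best : Int), minp ≤ pfx → 0 ≤ best →
    (l.foldl
      (fun (st : Int × Int) c =>
        let current := st.1 + g c
        let current := if current < 0 then 0 else current
        (current, max st.2 current)) (pfx - minp, best)).2
    = (l.foldl
      (fun (st : Int × Int × Int) c =>
        let p := st.1 + g c
        (p, if p < st.2.1 then p else st.2.1,
            if p - st.2.1 > st.2.2 then p - st.2.1 else st.2.2)) (pfx, minp, best)).2.2 := by
  intro l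
  induction l with
  | nil => intro pfx minp best _ _; rfl
  | cons c cs ih =>
    intro pfx minp best hmp hb
    have h1 : (if pfx - minp + g c < 0 then (0:Int) else pfx - minp + g c)
        = (pfx + g c) - (if pfx + g c < minp then pfx + g c else minp) := by
      split_ifs <;> omega
    have h2 : max best (if pfx - minp + g c < 0 then (0:Int) else pfx - minp + g c)
        = (if (pfx + g c) - minp > best then (pfx + g c) - minp else best) := by
      rw [max_def]; split_ifs <;> omega
    have hstepA : (let current := (pfx - minp, best).1 + g c
        let current := if current < 0 then 0 else current
        (current, max (pfx - minp, best).2 current))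
        = ((pfx + g c) - (if pfx + g c < minp then pfx + g c else minp),
           (if (pfx + g c) - minp > best then (pfx + g c) - minp else best)) := by
      show ((if pfx - minp + g c < 0 then (0:Int) else pfx - minp + g c),
            max best (if pfx - minp + g c < 0 then (0:Int) else pfx - minp + g c)) = _
      rw [h2, h1]
    rw [List.foldl_cons, List.foldl_cons, hstepA]
    exact ih (pfx + g c) (if pfx + g c < minp then pfx + g c else minp)
      (if (pfx + g c) - minp > best then (pfx + g c) - minp else best)
      (by split_ifs <;> omega) (by split_ifs <;> omega)

-- ===== VERDICT (by name: the statement is the Claim_ definition above) =====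
theorem maximumCostSubstring_spec : Claim_equal_maximumCostSubstring := by
  intro s chars vals hdom
  unfold Spec_maximumCostSubstring maximumCostSubstring maximumCostSubstring_alt
  simp only []
  have hdom' := hdom
  unfold Dom_maximumCostSubstring at hdom'
  simp only [Bool.and_eq_true, pvDomStr, List.all_eq_true] at hdom'
  obtain ⟨⟨hs, hch⟩, -⟩ := hdom'
  have hchars : ∀ p ∈ List.zip chars.toList vals, p.1.toNat < 128 := by
    intro p hp
    have := hch p.1 (List.of_mem_zip hp).1
    simp [pvDomChar] at this
    omega
  -- pointwise agreement of the two value tables on ASCII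
  have hagree : ∀ c : Char, c.toNat < 128 →
      ((List.zip chars.toList vals).foldl (fun d cv => d.insert cv.1 cv.2)
        ((PySem.List.pyRange 0 26 1).foldl
          (fun d i => d.insert (Char.ofNat (i.toNat + 97)) (i + 1)) PySem.Dict.empty)).getD c 0
      = ((List.zip chars.toList vals).foldl
          (fun t p => if p.1.toNat < 128 then PySem.List.pySetD t (p.1.toNat : Int) p.2 else t)
          ((PySem.List.pyRange 97 123 1).foldl
            (fun t k => PySem.List.pySetD t k (k - 96)) (List.replicate 128 0))).getD c.toNat 0 := by
    refine pairs_agree _ _ _ base_len hchars ?_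
    intro c hc
    have := base_agree c.toNat hc
    rw [Char.ofNat_toNat] at this
    simpa [PySem.List.pyGetD_natCast] using this
  -- length is preserved through the pair fold, so B's guarded pyGetD is plain getD
  set tbl := ((List.zip chars.toList vals).foldl
      (fun t p => if p.1.toNat < 128 then PySem.List.pySetD t (p.1.toNat : Int) p.2 else t)
      ((PySem.List.pyRange 97 123 1).foldl
        (fun t k => PySem.List.pySetD t k (k - 96)) (List.replicate 128 0))) with htbl
  -- rewrite B's fold to use A's lookup function, then apply the loop-shape lemma
  have hfun : ∀ (st : Int × Int × Int) c, c ∈ s.toList →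
      (let pfx := st.1 + (if c.toNat < 128 then PySem.List.pyGetD tbl (c.toNat : Int) 0 else 0)
       (pfx, if pfx < st.2.1 then pfx else st.2.1,
             if pfx - st.2.1 > st.2.2 then pfx - st.2.1 else st.2.2))
      = (let pfx := st.1 +
            ((List.zip chars.toList vals).foldl (fun d cv => d.insert cv.1 cv.2)
              ((PySem.List.pyRange 0 26 1).foldl
                (fun d i => d.insert (Char.ofNat (i.toNat + 97)) (i + 1)) PySem.Dict.empty)).getD c 0
         (pfx, if pfx < st.2.1 then pfx else st.2.1,
               if pfx - st.2.1 > st.2.2 then pfx - st.2.1 else st.2.2)) := by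
    intro st c hc
    have hlt : c.toNat < 128 := by
      have := hs c hc; simp [pvDomChar] at this; omega
    simp only [hlt, if_true, PySem.List.pyGetD_natCast, hagree c hlt, htbl]
  rw [List.foldl_ext _ _ _ hfun]
  have := kadane_eq_prefixmin
    (fun c => ((List.zip chars.toList vals).foldl (fun d cv => d.insert cv.1 cv.2)
      ((PySem.List.pyRange 0 26 1).foldl
        (fun d i => d.insert (Char.ofNat (i.toNat + 97)) (i + 1)) PySem.Dict.empty)).getD c 0)
    s.toList 0 0 0 le_rfl le_rfl
  simpa using this
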